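-- pv_equiv track=rewrite | github.com/golfeado/aoc | 2015/day3/solution.py | delivered
-- ===== SOURCE A (Python) =====
-- from dataclasses import dataclass
--
-- @dataclass
-- class Point:
--     x: int
--     y: int
--
-- def is_south(d: str) -> bool:
--     return d == 'v'
--
-- def is_north(d: str) -> bool:
--     return d == '^'
--
-- def is_east(d: str) -> bool:
--     return d == '>'
--
-- def is_west(d: str) -> bool:
--     return d == '<'
--
-- def delivered(directions: str) -> int:
--     "Calculate how many houses got delivered at least one present"
--     loc: Point = Point(0, 0)
--     visited: list[Point] = [loc]
--
--     for d in directions: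
--
--         if is_north(d):
--             loc = Point(loc.x, loc.y + 1)
--         elif is_south(d):
--             loc = Point(loc.x, loc.y - 1)
--         elif is_east(d):
--             loc = Point(loc.x + 1, loc.y)
--         elif is_west(d):
--             loc = Point(loc.x - 1, loc.y)
--         else:
--             break
--
--         visited.append(loc)
--
--     return len({(l.x, l.y) for l in visited})
-- ===== SOURCE B (Python) =====
-- def delivered(directions: str) -> int:
--     "Calculate how many houses got delivered at least one present"
--     deltas = {'^': (0, 1), 'v': (0, -1), '>': (1, 0), '<': (-1, 0)}
--     x = y = 0
--     pts = [(0, 0)]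
--     for c in directions:
--         if c not in deltas:
--             break
--         dx, dy = deltas[c]
--         x += dx
--         y += dy
--         pts.append((x, y))
--     # count distinct points by sorting and counting boundaries between runs,
--     # instead of hashing them into a set
--     pts.sort()
--     distinct = 1
--     for prev, cur in zip(pts, pts[1:]):
--         if prev != cur:
--             distinct += 1
--     return distinct
-- ===== Notes on version B (the rewrite author's own statement) =====
-- stated objective: alternative
-- what changed: B counts distinct houses by sorting the visited positions and counting boundaries between adjacent unequal entries (sort-then-scan), instead of A's hash-set comprehension; the walk uses a delta table with an explicit break instead of an if/elif chain of predicate helpers.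
import Mathlib
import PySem

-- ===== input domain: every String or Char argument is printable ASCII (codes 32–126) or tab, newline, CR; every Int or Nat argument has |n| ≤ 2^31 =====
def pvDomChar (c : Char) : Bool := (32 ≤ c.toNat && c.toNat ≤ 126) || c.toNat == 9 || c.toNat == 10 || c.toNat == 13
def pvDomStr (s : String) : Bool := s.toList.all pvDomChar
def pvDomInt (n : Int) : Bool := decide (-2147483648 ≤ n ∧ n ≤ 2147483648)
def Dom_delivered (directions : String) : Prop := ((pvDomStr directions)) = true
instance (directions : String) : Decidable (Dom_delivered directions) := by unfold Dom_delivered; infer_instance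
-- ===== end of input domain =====

-- B counts distinct visited positions by sorting them and counting run boundaries
-- (sort-then-scan) instead of A's hash-set comprehension; same return value, no speed claim.

-- ===== PORT A =====
-- A's loop: carries current location and the visited list, breaks at the first invalid char.
def deliveredLoop : (Int × Int) → List (Int × Int) → List Char → List (Int × Int)
  | _, visited, [] => visited
  | loc, visited, d :: ds =>
    if d = '^' then
      deliveredLoop (loc.1, loc.2 + 1) (visited ++ [(loc.1, loc.2 + 1)]) ds
    else if d = 'v' then
      deliveredLoop (loc.1, loc.2 - 1) (visited ++ [(loc.1, loc.2 - 1)]) ds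
    else if d = '>' then
      deliveredLoop (loc.1 + 1, loc.2) (visited ++ [(loc.1 + 1, loc.2)]) ds
    else if d = '<' then
      deliveredLoop (loc.1 - 1, loc.2) (visited ++ [(loc.1 - 1, loc.2)]) ds
    else
      visited  -- break

def delivered (directions : String) : Int :=
  ((PySem.Set.ofList (deliveredLoop (0, 0) [((0 : Int), (0 : Int))] directions.toList)).length : Int)

-- ===== PORT B =====
-- B's delta table (a Python dict: association list, first match)
def pvDeltas : PySem.Dict Char (Int × Int) :=
  PySem.Dict.ofList [('^', (0, 1)), ('v', (0, -1)), ('>', (1, 0)), ('<', (-1, 0))]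

-- B's walk loop: dict lookup, break when the char is not a key
def altWalk : (Int × Int) → List (Int × Int) → List Char → List (Int × Int)
  | _, pts, [] => pts
  | (x, y), pts, c :: cs =>
    match PySem.Dict.get? pvDeltas c with
    | none => pts  -- break
    | some (dx, dy) => altWalk (x + dx, y + dy) (pts ++ [(x + dx, y + dy)]) cs

def delivered_alt (directions : String) : Int :=
  let pts := altWalk (0, 0) [((0 : Int), (0 : Int))] directions.toList
  -- pts.sort(): Python's tuple sort = lexicographic by components (PySem.List.sorted2)
  let s := PySem.List.sorted2 pts Prod.fst Prod.snd
  -- for prev, cur in zip(s, s[1:]): if prev != cur: distinct += 1   (s[1:] = drop 1)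
  (List.zip s (s.drop 1)).foldl (fun acc p => if p.1 ≠ p.2 then acc + 1 else acc) 1

-- ===== PRECONDITION & SPEC =====
def Spec_delivered (directions : String) (out : Int) : Prop := out = delivered_alt directions
instance (directions : String) (out : Int) : Decidable (Spec_delivered directions out) := by unfold Spec_delivered; infer_instance

-- ===== CLAIM (what is proved, stated in full; the proofs are below) =====
def Claim_equal_delivered : Prop := ∀ (directions : String), Dom_delivered directions → Spec_delivered directions (delivered directions)

-- ===== LEMMAS AND PROOFS =====

-- the strict "before" comparison sorted2 uses for key components fst, snd
def lexB (a b : Int × Int) : Bool :=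
  decide (a.1 < b.1) || (!decide (b.1 < a.1) && decide (a.2 < b.2))

theorem lexB_asymm {a b : Int × Int} (h : lexB a b = true) : lexB b a = false := by
  rcases a with ⟨a1, a2⟩; rcases b with ⟨b1, b2⟩
  simp [lexB] at *; omega

theorem lexB_ntrans {a b c : Int × Int} (h1 : lexB a b = false) (h2 : lexB b c = false) :
    lexB a c = false := by
  rcases a with ⟨a1, a2⟩; rcases b with ⟨b1, b2⟩; rcases c with ⟨c1, c2⟩
  simp [lexB] at *; omega

theorem lexB_antisymm {a b : Int × Int} (h1 : lexB a b = false) (h2 : lexB b a = false) :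
    a = b := by
  rcases a with ⟨a1, a2⟩; rcases b with ⟨b1, b2⟩
  simp [lexB] at *; omega

-- insertion keeps the list sorted (Pairwise in the "not before backwards" order)
theorem pairwise_insertBy (x : Int × Int) :
    ∀ (ys : List (Int × Int)), ys.Pairwise (fun a b => lexB b a = false) →
      (PySem.List.insertBy lexB x ys).Pairwise (fun a b => lexB b a = false) := by
  intro ys
  induction ys with
  | nil => intro _; simp [PySem.List.insertBy]
  | cons y ys ih =>
    intro h
    rw [List.pairwise_cons] at h
    show (if lexB x y = true then x :: y :: ys else y :: PySem.List.insertBy lexB x ys).Pairwise _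
    by_cases hb : lexB x y = true
    · rw [if_pos hb]
      refine List.Pairwise.cons ?_ (List.Pairwise.cons h.1 h.2)
      intro z hz
      rcases List.mem_cons.mp hz with hz | hz
      · subst hz; exact lexB_asymm hb
      · exact lexB_ntrans (h.1 z hz) (lexB_asymm hb)
    · rw [if_neg hb]
      refine List.Pairwise.cons ?_ (ih h.2)
      intro z hz
      rcases (PySem.List.mem_insertBy lexB x z ys).mp hz with hz | hz
      · subst hz; exact Bool.eq_false_iff.mpr hb
      · exact h.1 z hz

theorem pairwise_foldl_insertBy (l : List (Int × Int)) :
    ∀ (acc : List (Int × Int)), acc.Pairwise (fun a b => lexB b a = false) →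
      (l.foldl (fun acc x => PySem.List.insertBy lexB x acc) acc).Pairwise
        (fun a b => lexB b a = false) := by
  induction l with
  | nil => intro acc h; simpa using h
  | cons x l ih => intro acc h; exact ih _ (pairwise_insertBy x acc h)

-- a set built from a list has as many elements as the list's Finset of members
theorem ofList_length_eq_card (l : List (Int × Int)) :
    (PySem.Set.ofList l).length = l.toFinset.card := by
  have hnd : (PySem.Set.ofList l).Nodup := PySem.Set.nodup_ofList l
  have hfs : (PySem.Set.ofList l).toFinset = l.toFinset := by
    ext x
    simp [List.mem_toFinset, PySem.Set.mem_ofList]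
  calc (PySem.Set.ofList l).length = (PySem.Set.ofList l).toFinset.card :=
        (List.toFinset_card_of_nodup hnd).symm
    _ = l.toFinset.card := by rw [hfs]

-- in a lex-sorted list, 1 + (number of adjacent unequal pairs) = number of distinct elements
theorem card_of_sorted :
    ∀ (s : List (Int × Int)), s.Pairwise (fun a b => lexB b a = false) → s ≠ [] →
      (s.toFinset.card : Int)
        = 1 + ((List.zip s (s.drop 1)).countP (fun p => decide (p.1 ≠ p.2)) : Int) := by
  intro s
  induction s with
  | nil => intro _ h; exact absurd rfl h
  | cons a t ih =>
    intro h _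
    cases t with
    | nil => simp
    | cons b t' =>
      rw [List.pairwise_cons] at h
      have htail := ih h.2 (by simp)
      have hzip : List.zip (a :: b :: t') ((a :: b :: t').drop 1)
          = (a, b) :: List.zip (b :: t') ((b :: t').drop 1) := by
        cases t' <;> simp
      by_cases hab : a = b
      · subst hab
        have : (a :: a :: t').toFinset = (a :: t').toFinset := by simp
        rw [this, hzip, htail]
        simp
      · have hnotmem : a ∉ (b :: t') := by
          intro hmem
          rcases List.mem_cons.mp hmem with hc | hc
          · exact hab hc
          · have h2 := List.pairwise_cons.mp h.2
            exact hab (lexB_antisymm (h2.1 a hc) (h.1 b (by simp)))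
        have hcard : (a :: b :: t').toFinset.card = (b :: t').toFinset.card + 1 := by
          rw [List.toFinset_cons, Finset.card_insert_of_notMem (by simpa using hnotmem)]
        rw [hzip]
        have : List.countP (fun p => decide (p.1 ≠ p.2))
            ((a, b) :: List.zip (b :: t') ((b :: t').drop 1))
            = List.countP (fun p => decide (p.1 ≠ p.2))
                (List.zip (b :: t') ((b :: t').drop 1)) + 1 := by
          rw [List.countP_cons]; simp [hab]
        rw [this, hcard]
        push_cast
        rw [htail]
        ring

-- the two walks build the same list of points
theorem altWalk_eq (ds : List Char) :
    ∀ (loc : Int × Int) (pts : List (Int × Int)),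
      altWalk loc pts ds = deliveredLoop loc pts ds := by
  induction ds with
  | nil => intro loc pts; rfl
  | cons d ds ih =>
    intro loc pts
    rcases loc with ⟨x, y⟩
    by_cases h1 : d = '^'
    · subst h1
      simp only [altWalk,
        show PySem.Dict.get? pvDeltas '^' = some ((0 : Int), (1 : Int)) from by decide, ih]
      simp [deliveredLoop]
    · by_cases h2 : d = 'v'
      · subst h2
        simp only [altWalk,
          show PySem.Dict.get? pvDeltas 'v' = some ((0 : Int), (-1 : Int)) from by decide, ih]
        simp [deliveredLoop, sub_eq_add_neg]
      · by_cases h3 : d = '>'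
        · subst h3
          simp only [altWalk,
            show PySem.Dict.get? pvDeltas '>' = some ((1 : Int), (0 : Int)) from by decide, ih]
          simp [deliveredLoop]
        · by_cases h4 : d = '<'
          · subst h4
            simp only [altWalk,
              show PySem.Dict.get? pvDeltas '<' = some ((-1 : Int), (0 : Int)) from by decide, ih]
            simp [deliveredLoop, sub_eq_add_neg]
          · have hg : PySem.Dict.get? pvDeltas d = none := by
              have hitems : pvDeltas.items
                  = [('^', (0, 1)), ('v', (0, -1)), ('>', (1, 0)), ('<', (-1, 0))] := by decide
              have e1 : ('^' == d) = false := by simp [Ne.symm h1]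
              have e2 : ('v' == d) = false := by simp [Ne.symm h2]
              have e3 : ('>' == d) = false := by simp [Ne.symm h3]
              have e4 : ('<' == d) = false := by simp [Ne.symm h4]
              simp [PySem.Dict.get?, hitems, List.find?, e1, e2, e3, e4]
            simp only [altWalk, hg, deliveredLoop, h1, h2, h3, h4, if_false]

-- the walk only ever extends the visited list
theorem deliveredLoop_ne_nil (ds : List Char) :
    ∀ (loc : Int × Int) (v : Int × Int) (vs : List (Int × Int)),
      deliveredLoop loc (v :: vs) ds ≠ [] := by
  induction ds with
  | nil => intro loc v vs; simp [deliveredLoop]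
  | cons d ds ih =>
    intro loc v vs
    simp only [deliveredLoop]
    split_ifs <;> first
      | (rw [show (v :: vs) ++ [_] = v :: (vs ++ [_]) from rfl]; exact ih _ _ _)
      | simp

-- counting distinct elements of any nonempty list by sort-then-scan
theorem set_len_eq_sorted_scan (L : List (Int × Int)) (hL : L ≠ []) :
    ((PySem.Set.ofList L).length : Int)
      = (List.zip (PySem.List.sorted2 L Prod.fst Prod.snd)
          ((PySem.List.sorted2 L Prod.fst Prod.snd).drop 1)).foldl
          (fun acc p => if p.1 ≠ p.2 then acc + 1 else acc) 1 := by
  set s := PySem.List.sorted2 L Prod.fst Prod.snd with hs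
  have hperm : s.Perm L := PySem.List.sorted2_perm L Prod.fst Prod.snd false
  have hpw : s.Pairwise (fun a b => lexB b a = false) := by
    rw [hs]
    exact pairwise_foldl_insertBy L [] (by simp)
  have hne : s ≠ [] := by
    intro h
    exact hL (List.Perm.eq_nil (h ▸ hperm).symm)
  have hfold : (List.zip s (s.drop 1)).foldl
      (fun acc p => if p.1 ≠ p.2 then acc + 1 else acc) (1 : Int)
      = 1 + ((List.zip s (s.drop 1)).countP (fun p => decide (p.1 ≠ p.2)) : Int) :=
    PySem.List.foldl_ite_add_one _ _ 1
  rw [hfold, ← card_of_sorted s hpw hne, ofList_length_eq_card,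
      ← List.toFinset_eq_of_perm s L hperm]

-- ===== VERDICT (by name: the statement is the Claim_ definition above) =====
theorem delivered_spec : Claim_equal_delivered := by
  intro directions _
  unfold Spec_delivered delivered delivered_alt
  rw [altWalk_eq]
  exact set_len_eq_sorted_scan _ (deliveredLoop_ne_nil _ _ _ _)
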